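-- pv_equiv track=rewrite | github.com/JesperDramsch/cassidoo | 2023-02-27.py | repeatedGroups
-- ===== SOURCE A (Python) =====
-- from typing import List
--
-- def repeatedGroups(numbers: List[int]) -> List[List[int]]:
--     """Groups numbers in a list.
--
--     Parameters
--     ----------
--     numbers : List[int]
--         List of numbers to group
--
--     Returns
--     -------
--     List[List[int]]
--         Grouped Groups
--
--     Examples
--     --------
--     >>> repeatedGroups([1, 2, 2, 4, 5])
--     [[2, 2]]
--
--     >>> repeatedGroups([1, 1, 0, 0, 8, 4, 4, 4, 3, 2, 1, 9, 9])
--     [[1, 1], [0, 0], [4, 4, 4], [9, 9]]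
--     """
--     current_num = numbers[0]
--     count = 0
--     out = []
--     for num in numbers + [None]:
--         if current_num != num:
--             if count > 1:
--                 out.append([current_num] * count)
--             count = 0
--             current_num = num
--         count += 1
--
--     return out
-- ===== SOURCE B (Python) =====
-- from typing import List
--
-- def repeatedGroups(numbers: List[int]) -> List[List[int]]:
--     out = []
--     i = 0
--     n = len(numbers)
--     while i < n:
--         j = i
--         while j < n and numbers[j] == numbers[i]:
--             j += 1
--         if j - i > 1:
--             out.append(numbers[i:j])
--         i = j
--     return out
-- ===== Notes on version B (the rewrite author's own statement) =====
-- stated objective: simpler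
-- what changed: B scans with two indices, finding each maximal run by advancing j and slicing it out, instead of A's current_num/count run-length bookkeeping over numbers + [None] with a trailing sentinel; Pre_ excludes the empty list, on which A raises IndexError.
import Mathlib
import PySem

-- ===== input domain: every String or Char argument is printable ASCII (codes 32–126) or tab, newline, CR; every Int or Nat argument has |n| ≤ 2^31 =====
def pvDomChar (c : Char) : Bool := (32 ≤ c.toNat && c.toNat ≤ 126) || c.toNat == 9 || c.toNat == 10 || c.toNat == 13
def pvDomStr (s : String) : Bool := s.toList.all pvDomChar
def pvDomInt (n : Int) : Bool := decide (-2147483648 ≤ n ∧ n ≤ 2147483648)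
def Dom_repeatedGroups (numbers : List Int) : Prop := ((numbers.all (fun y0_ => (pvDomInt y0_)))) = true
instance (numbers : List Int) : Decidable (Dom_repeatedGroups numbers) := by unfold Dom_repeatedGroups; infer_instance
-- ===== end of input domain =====

-- B replaces A's current_num/count bookkeeping over numbers + [None] with a two-index
-- maximal-run scan (span); same values, simpler decomposition. Pre_ excludes the empty
-- list, on which A raises IndexError; B there naturally returns [].


-- ===== PORT A =====
-- [current_num] * count ; current_num is an Option because the sentinel None is in scope,
-- but every append happens with a some (matching Python, where out never holds None-runs)
def pvMkRun (cur : Option Int) (count : Int) : List Int :=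
  match cur with
  | some c => List.replicate count.toNat c
  | none => []

-- the for-loop over numbers + [None], state (current_num, count, out)
def pvLoopA (cur : Option Int) (count : Int) (out : List (List Int)) :
    List (Option Int) → List (List Int)
  | [] => out
  | num :: rest =>
    if cur ≠ num then
      let out' := if count > 1 then out ++ [pvMkRun cur count] else out
      pvLoopA num 1 out' rest
    else
      pvLoopA cur (count + 1) out rest

def repeatedGroups (numbers : List Int) : List (List Int) :=
  match numbers with
  | [] => []  -- unreachable under Pre_: Python raises IndexError at numbers[0]
  | n0 :: _ => pvLoopA (some n0) 0 [] (numbers.map some ++ [none])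

-- ===== PORT B =====
-- the outer while: take the maximal run at the front (inner while + slice = span), emit if long
def repeatedGroups_alt : List Int → List (List Int)
  | [] => []
  | x :: xs =>
    let p := List.span (fun y => y == x) (x :: xs)
    if p.1.length > 1 then p.1 :: repeatedGroups_alt p.2 else repeatedGroups_alt p.2
termination_by l => l.length
decreasing_by
  all_goals
    have := List.length_dropWhile_le (fun y => y == x) xs
    simp only [List.span_eq_takeWhile_dropWhile, List.dropWhile_cons, beq_self_eq_true,
      if_true, List.length_cons]
    omega

-- ===== PRECONDITION & SPEC =====
-- Pre_ excludes exactly the empty list, on which Python A raises IndexError.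
def Pre_repeatedGroups (numbers : List Int) : Prop := numbers ≠ []
instance (numbers : List Int) : Decidable (Pre_repeatedGroups numbers) := by
  unfold Pre_repeatedGroups; infer_instance
def pvWitness_repeatedGroups : List Int := [1, 2, 2, 4, 5]

def Spec_repeatedGroups (numbers : List Int) (out : List (List Int)) : Prop :=
  out = repeatedGroups_alt numbers
instance (numbers : List Int) (out : List (List Int)) : Decidable (Spec_repeatedGroups numbers out) := by
  unfold Spec_repeatedGroups; infer_instance

-- ===== CLAIM (what is proved, stated in full; the proofs are below) =====
def Claim_equal_repeatedGroups : Prop := ∀ (numbers : List Int), Dom_repeatedGroups numbers → Pre_repeatedGroups numbers → Spec_repeatedGroups numbers (repeatedGroups numbers)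

-- ===== LEMMAS AND PROOFS =====

-- the run emitted from a pending (value c, count k)
def pvEmit (c : Int) (k : Int) : List (List Int) :=
  if k > 1 then [List.replicate k.toNat c] else []

theorem takeWhile_eq_replicate (c : Int) (xs : List Int) :
    xs.takeWhile (fun y => y == c) =
      List.replicate (xs.takeWhile (fun y => y == c)).length c := by
  induction xs with
  | nil => simp
  | cons y ys ih =>
    by_cases h : y = c
    · subst h; simpa [List.takeWhile_cons, List.replicate] using ih
    · have hyc : (y == c) = false := by simp [h]
      simp [hyc]

theorem alt_nil : repeatedGroups_alt [] = [] := by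
  simp [repeatedGroups_alt]

theorem alt_cons (x : Int) (xs : List Int) :
    repeatedGroups_alt (x :: xs) =
      pvEmit x (1 + (xs.takeWhile (fun y => y == x)).length) ++
        repeatedGroups_alt (xs.dropWhile (fun y => y == x)) := by
  conv_lhs => rw [repeatedGroups_alt.eq_def]
  simp only [List.span_eq_takeWhile_dropWhile, List.takeWhile_cons, List.dropWhile_cons,
    beq_self_eq_true, if_true, List.length_cons, pvEmit]
  by_cases h : (1 : Int) + (xs.takeWhile (fun y => y == x)).length > 1
  · have hn : ((xs.takeWhile (fun y => y == x)).length + 1 : Nat) > 1 := by omega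
    rw [if_pos hn, if_pos h]
    have hrep : x :: xs.takeWhile (fun y => y == x) =
        List.replicate ((1 : Int) + (xs.takeWhile (fun y => y == x)).length).toNat x := by
      have : ((1 : Int) + ((xs.takeWhile (fun y => y == x)).length : Int)).toNat =
          (xs.takeWhile (fun y => y == x)).length + 1 := by omega
      rw [this, List.replicate_succ]
      exact congrArg (x :: ·) (takeWhile_eq_replicate x xs)
    rw [← hrep]; simp
  · have hn : ¬ ((xs.takeWhile (fun y => y == x)).length + 1 : Nat) > 1 := by omega
    rw [if_neg hn, if_neg h]
    simp

-- invariant: running the loop with pending run (c, k) over xs ++ [None]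
theorem loopA_inv (xs : List Int) : ∀ (c k : Int) (out : List (List Int)), 0 ≤ k →
    pvLoopA (some c) k out (xs.map some ++ [none]) =
      out ++ pvEmit c (k + (xs.takeWhile (fun y => y == c)).length) ++
        repeatedGroups_alt (xs.dropWhile (fun y => y == c)) := by
  induction xs with
  | nil =>
    intro c k out hk
    simp only [List.map_nil, List.nil_append, pvLoopA, pvMkRun, pvEmit,
      List.takeWhile_nil, List.dropWhile_nil, alt_nil, List.length_nil,
      Nat.cast_zero, add_zero]
    split_ifs <;> simp_all
  | cons y ys ih =>
    intro c k out hk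
    by_cases h : y = c
    · subst h
      have step : pvLoopA (some y) k out ((y :: ys).map some ++ [none]) =
          pvLoopA (some y) (k + 1) out (ys.map some ++ [none]) := by
        simp [pvLoopA]
      rw [step, ih y (k + 1) out (by omega)]
      have hyy : (y == y) = true := by simp
      simp only [List.takeWhile_cons, List.dropWhile_cons, hyy, if_true, List.length_cons]
      have harith : k + 1 + ((ys.takeWhile (fun a => a == y)).length : Int) =
          k + (((ys.takeWhile (fun a => a == y)).length : Int) + 1) := by ring
      rw [harith]
      norm_num
    · have hne : some c ≠ some y := fun hc => h (Option.some.inj hc).symm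
      have step : pvLoopA (some c) k out ((y :: ys).map some ++ [none]) =
          pvLoopA (some y) 1 (if k > 1 then out ++ [pvMkRun (some c) k] else out)
            (ys.map some ++ [none]) := by
        simp only [List.map, List.cons_append, pvLoopA, if_pos hne]
      rw [step, ih y 1 _ (by omega)]
      have hyc : (y == c) = false := by simp [h]
      simp only [List.takeWhile_cons, List.dropWhile_cons, hyc, Bool.false_eq_true,
        if_false, List.length_nil, Nat.cast_zero, add_zero]
      rw [alt_cons y ys]
      simp only [pvEmit, pvMkRun]
      split_ifs <;> simp [List.append_assoc]

-- ===== VERDICT (by name: the statement is the Claim_ definition above) =====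
theorem repeatedGroups_spec : Claim_equal_repeatedGroups := by
  intro numbers _ hpre
  unfold Spec_repeatedGroups
  match numbers with
  | [] => exact absurd rfl hpre
  | n0 :: rest =>
    show repeatedGroups (n0 :: rest) = repeatedGroups_alt (n0 :: rest)
    have h0 : repeatedGroups (n0 :: rest) =
        pvLoopA (some n0) 1 [] (rest.map some ++ [none]) := by
      simp [repeatedGroups, pvLoopA]
    rw [h0, loopA_inv rest n0 1 [] (by omega), alt_cons n0 rest]
    simp
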